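-- pv_equiv track=rewrite | github.com/pypi-data/pypi-mirror-401 | packages/openubmc-bingo/openubmc_bingo-0.6.122-py3-none-any.whl/bmcgo/component/busctl_log_parse/busctl_log_parser.py | _brace_delta
-- ===== SOURCE A (Python) =====
-- def _brace_delta(line):
--     delta = 0
--     in_quote = False
--     quote_char = ''
--     i = 0
--     while i < len(line):
--         ch = line[i]
--         if ch in ("'", '"'):
--             if not in_quote:
--                 in_quote = True
--                 quote_char = ch
--             elif quote_char == ch:
--                 in_quote = False
--                 quote_char = ''
--             i += 1
--             continue
--         if not in_quote:
--             if ch == '{':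
--                 delta += 1
--             elif ch == '}':
--                 delta -= 1
--         i += 1
--     return delta
-- ===== SOURCE B (Python) =====
-- def _brace_delta(line):
--     delta = 0
--     i = 0
--     n = len(line)
--     while i < n:
--         ch = line[i]
--         if ch in "'\"":
--             j = line.find(ch, i + 1)
--             i = n if j == -1 else j + 1
--         else:
--             delta += (ch == '{') - (ch == '}')
--             i += 1
--     return delta
-- ===== Notes on version B (the rewrite author's own statement) =====
-- stated objective: alternative
-- what changed: Replaced A's per-character quote state machine (in_quote/quote_char flags) with an index-jumping scan: on a quote, str.find locates the matching same-type quote and the scan jumps past the whole quoted region; braces are counted only in the unquoted stretches.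
import Mathlib
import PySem

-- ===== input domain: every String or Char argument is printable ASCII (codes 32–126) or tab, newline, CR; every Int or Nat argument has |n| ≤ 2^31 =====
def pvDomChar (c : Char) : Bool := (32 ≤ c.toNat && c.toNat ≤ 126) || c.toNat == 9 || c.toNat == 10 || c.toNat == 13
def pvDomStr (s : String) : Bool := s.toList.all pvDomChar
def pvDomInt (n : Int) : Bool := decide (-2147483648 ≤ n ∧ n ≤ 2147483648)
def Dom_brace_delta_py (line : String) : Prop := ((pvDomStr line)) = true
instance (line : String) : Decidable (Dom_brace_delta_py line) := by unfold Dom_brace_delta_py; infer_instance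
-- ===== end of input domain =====

-- B replaces A's per-character in_quote/quote_char state machine by an index-jumping scan
-- (on a quote, jump past the whole same-type-quoted region); alternative structure, same cost.

-- ===== PORT A =====
-- A's while-loop as structural recursion over the remaining characters with the same state
-- (delta, in_quote, quote_char). Python's initial quote_char '' is a sentinel only ever read
-- while in_quote is true; it is carried here as the Char ' '.
def braceLoopA : List Char → Int → Bool → Char → Int
  | [], delta, _, _ => delta
  | ch :: rest, delta, inq, qc =>
    if ch = '\'' ∨ ch = '"' then
      if inq = false then braceLoopA rest delta true ch
      else if qc = ch then braceLoopA rest delta false ' '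
      else braceLoopA rest delta inq qc
    else if inq = false then
      if ch = '{' then braceLoopA rest (delta + 1) inq qc
      else if ch = '}' then braceLoopA rest (delta - 1) inq qc
      else braceLoopA rest delta inq qc
    else braceLoopA rest delta inq qc

def brace_delta_py (line : String) : Int :=
  braceLoopA line.toList 0 false ' '

-- ===== PORT B =====
-- line.find(ch, i + 1) followed by the jump to j + 1 (or to n when not found) = drop the
-- characters up to and including the first later same-type quote (all of them if unterminated).
def skipQuote (q : Char) : List Char → List Char
  | [] => []
  | c :: cs => if c = q then cs else skipQuote q cs

theorem skipQuote_length_le (q : Char) (cs : List Char) :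
    (skipQuote q cs).length ≤ cs.length := by
  induction cs with
  | nil => simp [skipQuote]
  | cons c cs ih =>
    simp only [skipQuote]
    split
    · simp
    · exact Nat.le_trans ih (Nat.le_succ _)

def braceLoopB : List Char → Int → Int
  | [], delta => delta
  | ch :: rest, delta =>
    if ch = '\'' ∨ ch = '"' then
      braceLoopB (skipQuote ch rest) delta
    else
      braceLoopB rest
        (delta + (if ch = '{' then 1 else 0) - (if ch = '}' then 1 else 0))
termination_by cs _ => cs.length
decreasing_by
  · exact Nat.lt_succ_of_le (skipQuote_length_le ch rest)
  · simp

def brace_delta_py_alt (line : String) : Int :=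
  braceLoopB line.toList 0

-- ===== PRECONDITION & SPEC =====
def Spec_brace_delta_py (line : String) (out : Int) : Prop := out = brace_delta_py_alt line
instance (line : String) (out : Int) : Decidable (Spec_brace_delta_py line out) := by unfold Spec_brace_delta_py; infer_instance

-- ===== CLAIM (what is proved, stated in full; the proofs are below) =====
def Claim_equal_brace_delta_py : Prop := ∀ (line : String), Dom_brace_delta_py line → Spec_brace_delta_py line (brace_delta_py line)

-- ===== LEMMAS AND PROOFS =====

-- While in_quote with quote_char q (a real quote), A only looks for the next q and counts
-- nothing — exactly B's skipQuote followed by the unquoted state.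
theorem braceLoopA_inQuote (q : Char) (hq : q = '\'' ∨ q = '"') :
    ∀ (cs : List Char) (d : Int),
      braceLoopA cs d true q = braceLoopA (skipQuote q cs) d false ' ' := by
  intro cs
  induction cs with
  | nil => intro d; simp [braceLoopA, skipQuote]
  | cons c cs ih =>
    intro d
    by_cases hcq : c = q
    · subst hcq
      simp [braceLoopA, skipQuote, hq]
    · have hqc : ¬ q = c := fun h => hcq h.symm
      have hstep : braceLoopA (c :: cs) d true q = braceLoopA cs d true q := by
        by_cases hquote : c = '\'' ∨ c = '"'
        · simp [braceLoopA, hquote, hqc]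
        · simp [braceLoopA, hquote]
      rw [hstep, ih, skipQuote, if_neg hcq]

theorem braceLoopA_eq_braceLoopB (cs : List Char) (d : Int) (qc : Char) :
    braceLoopA cs d false qc = braceLoopB cs d :=
  match cs with
  | [] => by simp [braceLoopA, braceLoopB]
  | c :: rest => by
    by_cases hquote : c = '\'' ∨ c = '"'
    · have h1 : braceLoopA (c :: rest) d false qc = braceLoopA rest d true c := by
        simp [braceLoopA, hquote]
      rw [h1, braceLoopA_inQuote c hquote rest d,
          braceLoopA_eq_braceLoopB (skipQuote c rest) d ' ']
      conv_rhs => rw [braceLoopB]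
      rw [if_pos hquote]
    · conv_rhs => rw [braceLoopB]
      rw [if_neg hquote, ← braceLoopA_eq_braceLoopB rest _ qc]
      by_cases h1 : c = '{'
      · subst h1; simp [braceLoopA]
      · by_cases h2 : c = '}'
        · subst h2; simp [braceLoopA]
        · simp [braceLoopA, hquote, h1, h2]
termination_by cs.length
decreasing_by
  · exact Nat.lt_succ_of_le (skipQuote_length_le c rest)
  · simp

-- ===== VERDICT (by name: the statement is the Claim_ definition above) =====
theorem brace_delta_py_spec : Claim_equal_brace_delta_py := by
  intro line _
  unfold Spec_brace_delta_py brace_delta_py brace_delta_py_alt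
  exact braceLoopA_eq_braceLoopB _ _ _
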